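-- pv_equiv track=rewrite | github.com/sjh90331/IT4320_Final_Project | app.py | generate_eticket
-- ===== SOURCE A (Python) =====
-- def generate_eticket(first_name):
--     template = "IT4320"
--     result = ""
--     name_index = 0
--     template_index = 0
--
--     while name_index < len(first_name) or template_index < len(template):
--         if name_index < len(first_name):
--             result += first_name[name_index]
--             name_index += 1
--         if template_index < len(template):
--             result += template[template_index]
--             template_index += 1
--     return result
-- ===== SOURCE B (Python) =====
-- def generate_eticket(first_name):
--     template = "IT4320"
--     k = min(len(first_name), len(template))
--     interleaved = ''.join(c + t for c, t in zip(first_name[:k], template[:k]))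
--     return interleaved + first_name[k:] + template[k:]
-- ===== Notes on version B (the rewrite author's own statement) =====
-- stated objective: faster
-- what changed: Instead of a two-counter loop with per-iteration bounds checks and quadratic string += that discovers the output shape step by step, B computes the split point k = min(len(name), 6) up front, interleaves only the common prefix with a single join, and appends both leftover tails as whole slices.
import Mathlib
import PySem

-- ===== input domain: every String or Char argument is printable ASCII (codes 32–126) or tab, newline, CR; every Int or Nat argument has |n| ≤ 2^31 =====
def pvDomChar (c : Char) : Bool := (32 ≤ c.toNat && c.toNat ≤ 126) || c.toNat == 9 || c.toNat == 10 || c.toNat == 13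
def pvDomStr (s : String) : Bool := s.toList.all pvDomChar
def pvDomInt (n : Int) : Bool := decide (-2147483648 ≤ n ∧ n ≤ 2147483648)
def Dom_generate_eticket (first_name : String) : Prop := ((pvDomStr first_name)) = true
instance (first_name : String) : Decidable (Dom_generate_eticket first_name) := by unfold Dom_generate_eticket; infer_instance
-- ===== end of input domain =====

-- B replaces A's two-counter bounds-checking loop by an up-front split at k = min(len, 6):
-- interleave the common prefix, then append both leftover tails as whole slices (alternative decomposition).


-- ===== PORT A =====
-- the while loop: each iteration appends first_name[name_index] if in range, then the template char
-- if in range; recursion on the two remaining suffixes transcribes the two index counters.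
def eticketLoopA : List Char → List Char → List Char
  | [], [] => []
  | a :: as, [] => a :: eticketLoopA as []
  | [], b :: bs => b :: eticketLoopA [] bs
  | a :: as, b :: bs => a :: b :: eticketLoopA as bs

def generate_eticket (first_name : String) : String :=
  String.mk (eticketLoopA first_name.toList "IT4320".toList)

-- ===== PORT B =====
-- k = min(len, 6); ''.join(c+t for c,t in zip(name[:k], template[:k])) is the flatMap over the
-- zipped common prefixes (zip of the two takes); the two slices [k:] are the drops (k ≤ length, so exact).
def generate_eticket_alt (first_name : String) : String :=
  let as := first_name.toList
  let ts := "IT4320".toList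
  let k := min as.length ts.length
  String.mk (((as.take k).zip (ts.take k)).flatMap (fun p => [p.1, p.2]) ++ as.drop k ++ ts.drop k)

-- ===== PRECONDITION & SPEC =====
def Spec_generate_eticket (first_name : String) (out : String) : Prop := out = generate_eticket_alt first_name
instance (first_name : String) (out : String) : Decidable (Spec_generate_eticket first_name out) := by unfold Spec_generate_eticket; infer_instance

-- ===== CLAIM (what is proved, stated in full; the proofs are below) =====
def Claim_equal_generate_eticket : Prop := ∀ (first_name : String), Dom_generate_eticket first_name → Spec_generate_eticket first_name (generate_eticket first_name)

-- ===== LEMMAS AND PROOFS =====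
theorem eticketLoopA_eq_split (as bs : List Char) :
    eticketLoopA as bs =
      ((as.take (min as.length bs.length)).zip (bs.take (min as.length bs.length))).flatMap
          (fun p => [p.1, p.2])
        ++ as.drop (min as.length bs.length) ++ bs.drop (min as.length bs.length) := by
  induction as generalizing bs with
  | nil =>
    induction bs with
    | nil => simp [eticketLoopA]
    | cons b bs ih => simp [eticketLoopA, ih]
  | cons a as ih =>
    cases bs with
    | nil => simp [eticketLoopA, ih []]
    | cons b bs => simp [eticketLoopA, ih bs]

-- ===== VERDICT (by name: the statement is the Claim_ definition above) =====
theorem generate_eticket_spec : Claim_equal_generate_eticket := by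
  intro s _
  unfold Spec_generate_eticket generate_eticket generate_eticket_alt
  rw [eticketLoopA_eq_split]
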